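-- pv_equiv track=rewrite | github.com/maheenali021/hackathon-01-AI-textbook | backend/rag_agent/skills/content_generation_skill.py | _generate_section_content
-- ===== SOURCE A (Python) =====
-- def _generate_section_content(section: str, target_audience: str, section_length: int) -> str:
--     """
--     Generate content for a specific section
--
--     Args:
--         section: The section title
--         target_audience: The target audience level
--         section_length: Approximate length for this section
--
--     Returns:
--         Section content string
--     """
--     # Generate mock content for the section
--     content = f"This section covers {section.lower()}, focusing on key concepts relevant to {target_audience} level understanding. "
--
--     if target_audience == "beginner":
--         content += "We'll explain fundamental principles with clear definitions and simple examples to build your understanding. "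
--     elif target_audience == "advanced":
--         content += "We'll explore complex implementations, edge cases, and cutting-edge research in this area. "
--     else:  # intermediate
--         content += "We'll examine both foundational concepts and more sophisticated applications. "
--
--     # Add more content based on section type
--     if "background" in section.lower() or "history" in section.lower():
--         content += "Historical context and evolution of these concepts provide insight into current approaches. "
--     elif "application" in section.lower() or "use" in section.lower():
--         content += "Real-world implementations demonstrate the practical value of these theoretical concepts. "
--     elif "future" in section.lower() or "trend" in section.lower():
--         content += "Emerging trends and future directions indicate the evolving landscape of this field. "
--
--     # Extend content to approximate desired length
--     while len(content.split()) < section_length: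
--         content += f"Additional details about {section.lower()} continue to build a comprehensive understanding. "
--
--     return content
-- ===== SOURCE B (Python) =====
-- def _generate_section_content(section: str, target_audience: str, section_length: int) -> str:
--     """Build the section text in parts, compute the number of filler sentences
--     arithmetically from running word counts, and join once (no re-splitting loop)."""
--     sec_low = section.lower()
--     parts = [f"This section covers {sec_low}, focusing on key concepts relevant to {target_audience} level understanding. "]
--
--     if target_audience == "beginner":
--         parts.append("We'll explain fundamental principles with clear definitions and simple examples to build your understanding. ")
--     elif target_audience == "advanced":
--         parts.append("We'll explore complex implementations, edge cases, and cutting-edge research in this area. ")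
--     else:
--         parts.append("We'll examine both foundational concepts and more sophisticated applications. ")
--
--     if "background" in sec_low or "history" in sec_low:
--         parts.append("Historical context and evolution of these concepts provide insight into current approaches. ")
--     elif "application" in sec_low or "use" in sec_low:
--         parts.append("Real-world implementations demonstrate the practical value of these theoretical concepts. ")
--     elif "future" in sec_low or "trend" in sec_low:
--         parts.append("Emerging trends and future directions indicate the evolving landscape of this field. ")
--
--     filler = f"Additional details about {sec_low} continue to build a comprehensive understanding. "
--     # every part ends with a space, so word counts add up across parts
--     words = sum(len(p.split()) for p in parts)
--     if words < section_length:
--         filler_words = len(filler.split())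
--         parts.extend([filler] * -(-(section_length - words) // filler_words))
--     return "".join(parts)
-- ===== Notes on version B (the rewrite author's own statement) =====
-- stated objective: faster
-- what changed: B builds the text as a list of parts and computes the number of filler sentences arithmetically from running word counts (one ceiling division), joining once, instead of A's while-loop that re-splits the whole growing string on every iteration.
import Mathlib
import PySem

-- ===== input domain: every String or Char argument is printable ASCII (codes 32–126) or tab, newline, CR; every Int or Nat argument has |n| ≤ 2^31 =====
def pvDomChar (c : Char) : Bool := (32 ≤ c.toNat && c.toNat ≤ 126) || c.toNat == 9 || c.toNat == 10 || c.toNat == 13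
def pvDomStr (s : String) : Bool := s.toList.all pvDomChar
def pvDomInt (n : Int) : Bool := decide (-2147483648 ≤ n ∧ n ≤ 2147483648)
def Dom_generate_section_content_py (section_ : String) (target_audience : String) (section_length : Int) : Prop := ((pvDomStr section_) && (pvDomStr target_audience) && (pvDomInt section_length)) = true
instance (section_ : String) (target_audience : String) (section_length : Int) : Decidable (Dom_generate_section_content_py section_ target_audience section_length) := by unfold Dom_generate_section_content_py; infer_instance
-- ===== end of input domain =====

-- B replaces A's quadratic while-loop (which re-splits the whole growing string each pass)
-- by a running word count and ONE ceiling division giving the number of filler sentences, joined once.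

-- ===== PORT A =====
-- the filler sentence both programs append (a shared literal)
def fillerSent (sec_low : List Char) : List Char :=
  "Additional details about ".toList ++ sec_low ++ " continue to build a comprehensive understanding. ".toList

-- A's while-loop: `while len(content.split()) < section_length: content += filler`.
-- The fuel argument only makes the loop total; it is always sufficient (proved below).
def pyExtend (sec_low : List Char) (L : Int) : Nat → List Char → List Char
  | 0, content => content
  | fuel + 1, content =>
      if ((PySem.Chars.split₀ content).length : Int) < L then
        pyExtend sec_low L fuel (content ++ fillerSent sec_low)
      else content

def generate_section_content_py (section_ : String) (target_audience : String) (section_length : Int) : String :=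
  let sec_low := PySem.Chars.lower section_.toList
  let content := "This section covers ".toList ++ sec_low ++ ", focusing on key concepts relevant to ".toList ++ target_audience.toList ++ " level understanding. ".toList
  let content :=
    if target_audience = "beginner" then
      content ++ "We'll explain fundamental principles with clear definitions and simple examples to build your understanding. ".toList
    else if target_audience = "advanced" then
      content ++ "We'll explore complex implementations, edge cases, and cutting-edge research in this area. ".toList
    else
      content ++ "We'll examine both foundational concepts and more sophisticated applications. ".toList
  let content :=
    if PySem.Chars.isIn "background".toList sec_low || PySem.Chars.isIn "history".toList sec_low then
      content ++ "Historical context and evolution of these concepts provide insight into current approaches. ".toList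
    else if PySem.Chars.isIn "application".toList sec_low || PySem.Chars.isIn "use".toList sec_low then
      content ++ "Real-world implementations demonstrate the practical value of these theoretical concepts. ".toList
    else if PySem.Chars.isIn "future".toList sec_low || PySem.Chars.isIn "trend".toList sec_low then
      content ++ "Emerging trends and future directions indicate the evolving landscape of this field. ".toList
    else content
  String.ofList (pyExtend sec_low section_length section_length.toNat content)

-- ===== PORT B =====
-- Source B's tail: sum the per-part word counts, one ceiling division, extend the parts list, join once
def altAssemble (sec_low : List Char) (L : Int) (parts : List (List Char)) : List Char :=
  let filler := fillerSent sec_low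
  let words : Int := ((parts.map (fun p => (PySem.Chars.split₀ p).length)).sum : Nat)
  let parts :=
    if words < L then
      let fw : Int := ((PySem.Chars.split₀ filler).length : Nat)
      parts ++ List.replicate (-(PySem.Int.floordiv (-(L - words)) fw)).toNat filler
    else parts
  PySem.Chars.join [] parts

def generate_section_content_py_alt (section_ : String) (target_audience : String) (section_length : Int) : String :=
  let sec_low := PySem.Chars.lower section_.toList
  let p1 := "This section covers ".toList ++ sec_low ++ ", focusing on key concepts relevant to ".toList ++ target_audience.toList ++ " level understanding. ".toList
  let p2 :=
    if target_audience = "beginner" then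
      "We'll explain fundamental principles with clear definitions and simple examples to build your understanding. ".toList
    else if target_audience = "advanced" then
      "We'll explore complex implementations, edge cases, and cutting-edge research in this area. ".toList
    else
      "We'll examine both foundational concepts and more sophisticated applications. ".toList
  let parts :=
    if PySem.Chars.isIn "background".toList sec_low || PySem.Chars.isIn "history".toList sec_low then
      [p1, p2, "Historical context and evolution of these concepts provide insight into current approaches. ".toList]
    else if PySem.Chars.isIn "application".toList sec_low || PySem.Chars.isIn "use".toList sec_low then
      [p1, p2, "Real-world implementations demonstrate the practical value of these theoretical concepts. ".toList]
    else if PySem.Chars.isIn "future".toList sec_low || PySem.Chars.isIn "trend".toList sec_low then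
      [p1, p2, "Emerging trends and future directions indicate the evolving landscape of this field. ".toList]
    else [p1, p2]
  String.ofList (altAssemble sec_low section_length parts)

-- ===== PRECONDITION & SPEC =====
def Spec_generate_section_content_py (section_ : String) (target_audience : String) (section_length : Int) (out : String) : Prop := out = generate_section_content_py_alt section_ target_audience section_length
instance (section_ : String) (target_audience : String) (section_length : Int) (out : String) : Decidable (Spec_generate_section_content_py section_ target_audience section_length out) := by unfold Spec_generate_section_content_py; infer_instance

-- ===== CLAIM (what is proved, stated in full; the proofs are below) =====
def Claim_equal_generate_section_content_py : Prop := ∀ (section_ : String) (target_audience : String) (section_length : Int), Dom_generate_section_content_py section_ target_audience section_length → Spec_generate_section_content_py section_ target_audience section_length (generate_section_content_py section_ target_audience section_length)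

-- ===== LEMMAS AND PROOFS =====

-- split₀.go pulls its accumulator out front
lemma pv_go_acc (s : List Char) : ∀ (cur : List Char) (acc : List (List Char)),
    PySem.Chars.split₀.go s cur acc = acc.reverse ++ PySem.Chars.split₀.go s cur [] := by
  induction s with
  | nil =>
      intro cur acc
      by_cases h : cur.isEmpty <;> simp [PySem.Chars.split₀.go, h]
  | cons c rest ih =>
      intro cur acc
      by_cases hs : PySem.Chars.isspace c
      · by_cases h : cur.isEmpty
        · simp [PySem.Chars.split₀.go, hs, h, ih [] acc]
        · simp only [PySem.Chars.split₀.go, hs, h, if_true, if_false, Bool.false_eq_true]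
          rw [ih [] (cur.reverse :: acc), ih [] [cur.reverse]]
          simp
      · simp only [PySem.Chars.split₀.go, hs, if_false, Bool.false_eq_true]
        exact ih (c :: cur) acc

-- a whitespace character splits the word scan cleanly
lemma pv_go_space {c : Char} (hc : PySem.Chars.isspace c = true) (v : List Char) :
    ∀ (u cur : List Char) (acc : List (List Char)),
    PySem.Chars.split₀.go (u ++ c :: v) cur acc =
      PySem.Chars.split₀.go u cur acc ++ PySem.Chars.split₀.go v [] [] := by
  intro u
  induction u with
  | nil =>
      intro cur acc
      by_cases h : cur.isEmpty
      · simp [PySem.Chars.split₀.go, hc, h, pv_go_acc v [] acc]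
      · simp only [List.nil_append, PySem.Chars.split₀.go, hc, h, if_true, if_false,
          Bool.false_eq_true]
        rw [pv_go_acc v [] (cur.reverse :: acc)]
  | cons d u' ih =>
      intro cur acc
      by_cases hs : PySem.Chars.isspace d
      · by_cases h : cur.isEmpty <;>
          simp [PySem.Chars.split₀.go, hs, h, ih]
      · simp [PySem.Chars.split₀.go, hs, ih]

lemma pv_split_space {c : Char} (hc : PySem.Chars.isspace c = true) (u v : List Char) :
    PySem.Chars.split₀ (u ++ c :: v) = PySem.Chars.split₀ u ++ PySem.Chars.split₀ v := by
  simp [PySem.Chars.split₀, pv_go_space hc v u [] []]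

-- a piece that ends with a space contributes its own words, independently of what follows
lemma pv_split_ends_space (u v : List Char) :
    PySem.Chars.split₀ ((u ++ [' ']) ++ v) = PySem.Chars.split₀ (u ++ [' ']) ++ PySem.Chars.split₀ v := by
  have hsp : PySem.Chars.isspace ' ' = true := by decide
  have h1 : (u ++ [' ']) ++ v = u ++ ' ' :: v := by simp
  have h2 : u ++ [' '] = u ++ ' ' :: ([] : List Char) := by simp
  rw [h1, pv_split_space hsp u v, h2, pv_split_space hsp u []]
  simp [PySem.Chars.split₀, PySem.Chars.split₀.go]

-- the word count of a concatenation of space-terminated parts is the sum of the parts' counts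
lemma pv_split_flatten (parts : List (List Char)) (h : ∀ p ∈ parts, ∃ u, p = u ++ [' ']) :
    PySem.Chars.split₀ parts.flatten = (parts.map PySem.Chars.split₀).flatten := by
  induction parts with
  | nil => simp [PySem.Chars.split₀, PySem.Chars.split₀.go]
  | cons p ps ih =>
      obtain ⟨u, hu⟩ := h p (by simp)
      simp only [List.flatten_cons, List.map_cons]
      rw [hu, pv_split_ends_space u ps.flatten, ih (fun q hq => h q (by simp [hq]))]

-- the filler sentence ends with a space and its word count is 9 + (words of sec_low)
lemma pv_filler_ends (sec_low : List Char) : ∃ u, fillerSent sec_low = u ++ [' '] := by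
  refine ⟨"Additional details about ".toList ++ sec_low ++ " continue to build a comprehensive understanding.".toList, ?_⟩
  simp [fillerSent]

lemma pv_filler_words (sec_low : List Char) :
    (PySem.Chars.split₀ (fillerSent sec_low)).length = 9 + (PySem.Chars.split₀ sec_low).length := by
  have h1 : fillerSent sec_low =
      "Additional details about".toList ++ ' ' :: (sec_low ++ ' ' :: "continue to build a comprehensive understanding. ".toList) := by
    simp [fillerSent]
  have hsp : PySem.Chars.isspace ' ' = true := by decide
  rw [h1, pv_split_space hsp, pv_split_space hsp]
  have e1 : (PySem.Chars.split₀ "Additional details about".toList).length = 3 := by decide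
  have e2 : (PySem.Chars.split₀ "continue to build a comprehensive understanding. ".toList).length = 6 := by decide
  simp only [List.length_append, e1, e2]
  omega

-- join with empty separator is flatten
lemma pv_join_nil (l : List (List Char)) : PySem.Chars.join [] l = l.flatten := by
  simp only [PySem.Chars.join, List.intercalate]
  induction l with
  | nil => simp
  | cons a t ih =>
      cases t with
      | nil => simp
      | cons b t' => simpa using ih

-- ceiling-division bracket: q := -((-a) // wf) satisfies (q-1)*wf < a ≤ q*wf
lemma pv_ceil_bracket {a wf : Int} (hwf : 0 < wf) :
    ((-(PySem.Int.floordiv (-a) wf)) - 1) * wf < a ∧ a ≤ (-(PySem.Int.floordiv (-a) wf)) * wf :=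
  (PySem.Int.neg_floordiv_neg_eq_iff_of_pos hwf).mp rfl

-- A's loop, run with enough fuel from a space-terminated state, appends exactly k fillers,
-- where k is characterised by the ceiling bracket
lemma pv_loop_rep (sec_low : List Char) (L : Int) (wf : Int)
    (hwf : wf = ((PySem.Chars.split₀ (fillerSent sec_low)).length : Int)) :
    ∀ (k fuel : Nat) (c0 u : List Char), c0 = u ++ [' '] → k ≤ fuel →
    (k = 0 → L ≤ ((PySem.Chars.split₀ c0).length : Int)) →
    (0 < k → ((PySem.Chars.split₀ c0).length : Int) + ((k : Int) - 1) * wf < L ∧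
             L ≤ ((PySem.Chars.split₀ c0).length : Int) + (k : Int) * wf) →
    pyExtend sec_low L fuel c0 = c0 ++ (List.replicate k (fillerSent sec_low)).flatten := by
  intro k
  induction k with
  | zero =>
      intro fuel c0 u hc0 _ h0 _
      cases fuel with
      | zero => simp [pyExtend]
      | succ f =>
          have : ¬ (((PySem.Chars.split₀ c0).length : Int) < L) := not_lt.mpr (h0 rfl)
          simp [pyExtend, this]
  | succ k ih =>
      intro fuel c0 u hc0 hfuel _ hpos
      obtain ⟨hlt, hle⟩ := hpos (Nat.succ_pos k)
      cases fuel with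
      | zero => omega
      | succ f =>
          have hw : ((PySem.Chars.split₀ c0).length : Int) < L := by
            have hk : (0 : Int) ≤ (k : Int) := Int.natCast_nonneg k
            push_cast at hlt
            nlinarith
          have hstep : PySem.Chars.split₀ (c0 ++ fillerSent sec_low) =
              PySem.Chars.split₀ c0 ++ PySem.Chars.split₀ (fillerSent sec_low) := by
            rw [hc0]; exact pv_split_ends_space u (fillerSent sec_low)
          obtain ⟨v, hv⟩ := pv_filler_ends sec_low
          have hends : c0 ++ fillerSent sec_low = (c0 ++ v) ++ [' '] := by
            rw [hv, List.append_assoc]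
          have hwc : ((PySem.Chars.split₀ (c0 ++ fillerSent sec_low)).length : Int) =
              ((PySem.Chars.split₀ c0).length : Int) + wf := by
            rw [hstep]; simp [hwf]
          have := ih f (c0 ++ fillerSent sec_low) (c0 ++ v) hends (by omega)
            (by intro h0; rw [hwc]; subst h0; simpa using hle)
            (by
              intro hk
              rw [hwc]
              constructor
              · have : ((PySem.Chars.split₀ c0).length : Int) + wf + ((k : Int) - 1) * wf =
                    ((PySem.Chars.split₀ c0).length : Int) + (((k + 1 : Nat) : Int) - 1) * wf := by
                  push_cast; ring
                rw [this]; exact hlt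
              · have : ((PySem.Chars.split₀ c0).length : Int) + wf + (k : Int) * wf =
                    ((PySem.Chars.split₀ c0).length : Int) + ((k + 1 : Nat) : Int) * wf := by
                  push_cast; ring
                rw [this]; exact hle)
          simp only [pyExtend, hw, if_true]
          rw [this]
          simp [List.replicate_succ]

-- a nonempty concatenation of space-terminated parts ends with a space
lemma pv_flatten_ends (parts : List (List Char)) (h : ∀ p ∈ parts, ∃ u, p = u ++ [' '])
    (hne : parts ≠ []) : ∃ u, parts.flatten = u ++ [' '] := by
  induction parts with
  | nil => exact absurd rfl hne
  | cons p ps ih =>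
      cases ps with
      | nil =>
          obtain ⟨u, hu⟩ := h p (by simp)
          exact ⟨u, by simpa using hu⟩
      | cons q qs =>
          obtain ⟨u, hu⟩ := ih (fun r hr => h r (by simp [List.mem_cons] at hr ⊢; tauto)) (by simp)
          exact ⟨p ++ u, by simp [hu]⟩

-- the core agreement: A's loop from a flatten of space-terminated parts computes B's assembly
lemma pv_main_core (sec_low : List Char) (L : Int) (parts : List (List Char))
    (h : ∀ p ∈ parts, ∃ u, p = u ++ [' ']) (hne : parts ≠ []) :
    pyExtend sec_low L L.toNat parts.flatten = altAssemble sec_low L parts := by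
  set wf : Int := ((PySem.Chars.split₀ (fillerSent sec_low)).length : Int) with hwf
  have hwfpos : 0 < wf := by rw [hwf, pv_filler_words]; positivity
  have hwords : ((PySem.Chars.split₀ parts.flatten).length : Int) =
      (((parts.map (fun p => (PySem.Chars.split₀ p).length)).sum : Nat) : Int) := by
    have hN : (PySem.Chars.split₀ parts.flatten).length =
        (parts.map (fun p => (PySem.Chars.split₀ p).length)).sum := by
      rw [pv_split_flatten parts h]
      simp [List.length_flatten, List.map_map]
      rfl
    exact_mod_cast congrArg (Nat.cast : Nat → Int) hN
  set W : Int := (((parts.map (fun p => (PySem.Chars.split₀ p).length)).sum : Nat) : Int) with hW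
  have hWnn : 0 ≤ W := Int.natCast_nonneg _
  obtain ⟨u0, hu0⟩ := pv_flatten_ends parts h hne
  by_cases hcond : W < L
  · -- k := ceiling of (L - W) / wf
    set q : Int := -(PySem.Int.floordiv (-(L - W)) wf) with hq
    obtain ⟨hqlt, hqle⟩ := pv_ceil_bracket (a := L - W) hwfpos
    have hq1 : 1 ≤ q := by nlinarith
    have hfuel : q.toNat ≤ L.toNat := by
      have h1 : (q - 1) * 1 ≤ (q - 1) * wf := by
        apply mul_le_mul_of_nonneg_left <;> omega
      have : q - 1 < L - W := by nlinarith
      omega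
    have hrep := pv_loop_rep sec_low L wf rfl q.toNat L.toNat
      parts.flatten u0 hu0 hfuel
      (by intro h0; omega)
      (by
        intro _
        have hqq : (q.toNat : Int) = q := by omega
        constructor
        · rw [hwords, hqq]; linarith
        · rw [hwords, hqq]; linarith)
    rw [hrep]
    simp only [altAssemble, pv_join_nil]
    simp only [← hW, hcond, if_true, ← hwf, ← hq]
    simp [List.flatten_append]
  · have hrep := pv_loop_rep sec_low L wf rfl 0 L.toNat
      parts.flatten u0 hu0 (Nat.zero_le _)
      (by intro _; rw [hwords]; exact not_lt.mp hcond)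
      (by intro h0; omega)
    rw [hrep]
    simp only [altAssemble, pv_join_nil]
    simp only [← hW, hcond, if_false]
    simp

-- a piece ending in a space, behind any prefix
lemma pv_ends_append (a b : List Char) (h : ∃ u, b = u ++ [' ']) : ∃ w, a ++ b = w ++ [' '] := by
  obtain ⟨u, rfl⟩ := h
  exact ⟨a ++ u, by simp⟩

lemma pv_ends_lit (l : List Char) (h : l.getLast? = some ' ') : ∃ u, l = u ++ [' '] := by
  rwa [List.getLast?_eq_some_iff] at h

-- the two part-list shapes the branches produce
lemma pv_branch2 (sec p1 p2 : List Char) (L : Int)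
    (h1 : ∃ u, p1 = u ++ [' ']) (h2 : ∃ u, p2 = u ++ [' ']) :
    pyExtend sec L L.toNat (p1 ++ p2) = altAssemble sec L [p1, p2] := by
  have h := pv_main_core sec L [p1, p2]
    (by intro p hp; simp only [List.mem_cons, List.not_mem_nil, or_false] at hp
        rcases hp with rfl | rfl <;> assumption)
    (by simp)
  simpa using h

lemma pv_branch3 (sec p1 p2 p3 : List Char) (L : Int)
    (h1 : ∃ u, p1 = u ++ [' ']) (h2 : ∃ u, p2 = u ++ [' ']) (h3 : ∃ u, p3 = u ++ [' ']) :
    pyExtend sec L L.toNat ((p1 ++ p2) ++ p3) = altAssemble sec L [p1, p2, p3] := by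
  have h := pv_main_core sec L [p1, p2, p3]
    (by intro p hp; simp only [List.mem_cons, List.not_mem_nil, or_false] at hp
        rcases hp with rfl | rfl | rfl <;> assumption)
    (by simp)
  have hf : [p1, p2, p3].flatten = (p1 ++ p2) ++ p3 := by simp
  rw [hf] at h
  exact h

-- ===== VERDICT (by name: the statement is the Claim_ definition above) =====
theorem generate_section_content_py_spec : Claim_equal_generate_section_content_py := by
  intro section_ target_audience section_length _
  unfold Spec_generate_section_content_py
  have hA : ∃ u, " level understanding. ".toList = u ++ [' '] := pv_ends_lit _ (by decide)
  have hp1 : ∃ u, "This section covers ".toList ++ PySem.Chars.lower section_.toList ++ ", focusing on key concepts relevant to ".toList ++ target_audience.toList ++ " level understanding. ".toList = u ++ [' '] :=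
    pv_ends_append _ _ hA
  have hb1 : ∃ u, "We'll explain fundamental principles with clear definitions and simple examples to build your understanding. ".toList = u ++ [' '] := pv_ends_lit _ (by decide)
  have hb2 : ∃ u, "We'll explore complex implementations, edge cases, and cutting-edge research in this area. ".toList = u ++ [' '] := pv_ends_lit _ (by decide)
  have hb3 : ∃ u, "We'll examine both foundational concepts and more sophisticated applications. ".toList = u ++ [' '] := pv_ends_lit _ (by decide)
  have hs1 : ∃ u, "Historical context and evolution of these concepts provide insight into current approaches. ".toList = u ++ [' '] := pv_ends_lit _ (by decide)
  have hs2 : ∃ u, "Real-world implementations demonstrate the practical value of these theoretical concepts. ".toList = u ++ [' '] := pv_ends_lit _ (by decide)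
  have hs3 : ∃ u, "Emerging trends and future directions indicate the evolving landscape of this field. ".toList = u ++ [' '] := pv_ends_lit _ (by decide)
  simp only [generate_section_content_py, generate_section_content_py_alt]
  split_ifs
  all_goals refine congrArg String.ofList ?_
  -- 12 goals: for each section-type branch (outermost if), the three audience branches
  · exact pv_branch3 _ _ _ _ _ hp1 hb1 hs1
  · exact pv_branch3 _ _ _ _ _ hp1 hb2 hs1
  · exact pv_branch3 _ _ _ _ _ hp1 hb3 hs1
  · exact pv_branch3 _ _ _ _ _ hp1 hb1 hs2
  · exact pv_branch3 _ _ _ _ _ hp1 hb2 hs2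
  · exact pv_branch3 _ _ _ _ _ hp1 hb3 hs2
  · exact pv_branch3 _ _ _ _ _ hp1 hb1 hs3
  · exact pv_branch3 _ _ _ _ _ hp1 hb2 hs3
  · exact pv_branch3 _ _ _ _ _ hp1 hb3 hs3
  · exact pv_branch2 _ _ _ _ hp1 hb1
  · exact pv_branch2 _ _ _ _ hp1 hb2
  · exact pv_branch2 _ _ _ _ hp1 hb3
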